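-- pv_equiv track=rewrite | github.com/HustleHarder86/ProgrammaticSEOTool | app/agents/data_manager.py | _process_json_array
-- ===== SOURCE A (Python) =====
-- from typing import List, Dict, Any, Optional, Tuple, Set
--
-- def _process_json_array(data: List[Dict]) -> Dict[str, List[str]]:
--     """Process array of objects into columnar data"""
--     if not data:
--         return {}
--
--     # Extract all unique keys
--     all_keys = set()
--     for item in data:
--         if isinstance(item, dict):
--             all_keys.update(item.keys())
--
--     # Build columnar data
--     result = {key: [] for key in all_keys}
--
--     for item in data:
--         if isinstance(item, dict):
--             for key in all_keys:
--                 value = item.get(key, '')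
--                 result[key].append(str(value))
--
--     return result
-- ===== SOURCE B (Python) =====
-- def _process_json_array(data):
--     """Process array of objects into columnar data.
--     Single pass: create columns as keys are first seen (back-filled with ''),
--     append one cell per row to every existing column."""
--     result = {}
--     n = 0
--     for item in data:
--         if isinstance(item, dict):
--             for key in item:
--                 if key not in result:
--                     result[key] = [''] * n
--             for key in result:
--                 result[key].append(str(item.get(key, '')))
--             n += 1
--     return result
-- ===== Notes on version B (the rewrite author's own statement) =====
-- stated objective: alternative
-- what changed: Replaces A's two passes (collect all keys into a set, then fill every column row by row) with a single pass that creates a column when its key is first seen, back-fills it with '' for earlier rows, and appends one cell per row to every existing column.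
import Mathlib
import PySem

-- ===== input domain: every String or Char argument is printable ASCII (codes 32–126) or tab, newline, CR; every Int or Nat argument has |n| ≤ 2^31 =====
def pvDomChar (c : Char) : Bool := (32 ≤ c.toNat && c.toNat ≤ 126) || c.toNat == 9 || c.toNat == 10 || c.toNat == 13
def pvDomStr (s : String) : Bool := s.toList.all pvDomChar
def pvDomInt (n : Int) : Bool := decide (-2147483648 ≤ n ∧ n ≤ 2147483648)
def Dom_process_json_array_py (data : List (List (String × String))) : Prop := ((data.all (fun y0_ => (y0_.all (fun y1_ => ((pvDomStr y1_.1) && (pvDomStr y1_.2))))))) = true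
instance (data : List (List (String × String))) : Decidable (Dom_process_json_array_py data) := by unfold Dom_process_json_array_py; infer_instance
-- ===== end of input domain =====

-- B is a single pass over the rows (columns created on first sight and back-filled)
-- instead of A's two passes (key-collection pass, then fill pass): objective 'alternative'.
-- Dicts are association lists; item.get(key, '') = first match (exact for dict inputs, whose keys are unique).
def pvGet (item : List (String × String)) (k : String) : String :=
  ((item.find? (fun p => p.1 == k)).map Prod.snd).getD ""

-- ===== PORT A =====
def process_json_array_py (data : List (List (String × String))) : List (String × List String) :=
  if data = [] then []
  else
    -- all_keys = set(); for item in data: all_keys.update(item.keys())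
    let all_keys : PySem.Set String :=
      data.foldl (fun s item => PySem.Set.update s (item.map Prod.fst)) PySem.Set.empty
    -- result = {key: [] for key in all_keys}  (keys distinct, inserted in order)
    let init : List (String × List String) := all_keys.map (fun k => (k, ([] : List String)))
    -- for item in data: for key in all_keys: result[key].append(str(item.get(key, '')))
    data.foldl (fun res item =>
      all_keys.foldl (fun res k =>
        res.map (fun p => if p.1 == k then (p.1, p.2 ++ [pvGet item k]) else p)) res) init

-- ===== PORT B =====
def process_json_array_py_alt (data : List (List (String × String))) : List (String × List String) :=
  (data.foldl (fun (st : List (String × List String) × Nat) item =>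
      -- for key in item: if key not in result: result[key] = [''] * n
      let res := item.foldl (fun r (kv : String × String) =>
          if r.any (fun p => p.1 == kv.1) then r
          else r ++ [(kv.1, List.replicate st.2 "")]) st.1
      -- for key in result: result[key].append(str(item.get(key, '')));  n += 1
      (res.map (fun p => (p.1, p.2 ++ [pvGet item p.1])), st.2 + 1))
    ([], 0)).1

-- ===== PRECONDITION & SPEC =====
def Spec_process_json_array_py (data : List (List (String × String))) (out : List (String × List String)) : Prop := out = process_json_array_py_alt data
instance (data : List (List (String × String))) (out : List (String × List String)) : Decidable (Spec_process_json_array_py data out) := by unfold Spec_process_json_array_py; infer_instance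

-- ===== CLAIM (what is proved, stated in full; the proofs are below) =====
def Claim_equal_process_json_array_py : Prop := ∀ (data : List (List (String × String))), Dom_process_json_array_py data → Spec_process_json_array_py data (process_json_array_py data)

-- ===== LEMMAS AND PROOFS =====

-- common target: columns for the first-seen distinct keys, each column = one cell per row
def pvCols (data : List (List (String × String))) : List (String × List String) :=
  (PySem.List.dedup (data.flatMap (fun it => it.map Prod.fst))).map
    (fun k => (k, data.map (fun it => pvGet it k)))

theorem pvGet_of_not_mem (item : List (String × String)) (k : String)
    (h : k ∉ item.map Prod.fst) : pvGet item k = "" := by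
  have : item.find? (fun p => p.1 == k) = none := by
    rw [List.find?_eq_none]
    intro p hp
    simp only [beq_iff_eq]
    intro hk; exact h (List.mem_map.mpr ⟨p, hp, hk⟩)
  simp [pvGet, this]

theorem keys_foldl_update (data : List (List (String × String))) (s : PySem.Set String) :
    data.foldl (fun s item => PySem.Set.update s (item.map Prod.fst)) s
      = PySem.Set.update s (data.flatMap (fun it => it.map Prod.fst)) := by
  induction data generalizing s with
  | nil => simp [PySem.Set.update]
  | cons item rest ih =>
      simp only [List.foldl_cons, List.flatMap_cons, ih, PySem.Set.update_append]

-- A's inner loop: every key of ks (nodup) gets its cell appended once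
theorem innerA (item : List (String × String)) (ks : List String) (hnd : ks.Nodup)
    (res : List (String × List String)) :
    ks.foldl (fun res k =>
        res.map (fun p => if p.1 == k then (p.1, p.2 ++ [pvGet item k]) else p)) res
      = res.map (fun p => if p.1 ∈ ks then (p.1, p.2 ++ [pvGet item p.1]) else p) := by
  induction ks generalizing res with
  | nil => simp
  | cons k rest ih =>
      have hk : k ∉ rest := (List.nodup_cons.mp hnd).1
      rw [List.foldl_cons, ih (List.nodup_cons.mp hnd).2, List.map_map]
      apply List.map_congr_left
      intro p _
      by_cases hpk : p.1 = k
      · subst hpk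
        simp [hk]
      · simp only [Function.comp, beq_iff_eq, hpk, if_false, List.mem_cons]
        by_cases hpr : p.1 ∈ rest <;> simp [hpr]

-- A's outer loop, on a state of the invariant shape
theorem outerA (ks : List String) (hnd : ks.Nodup)
    (data : List (List (String × String))) (g : String → List String) :
    data.foldl (fun res item =>
        ks.foldl (fun res k =>
          res.map (fun p => if p.1 == k then (p.1, p.2 ++ [pvGet item k]) else p)) res)
      (ks.map (fun k => (k, g k)))
      = ks.map (fun k => (k, g k ++ data.map (fun it => pvGet it k))) := by
  induction data generalizing g with
  | nil => simp
  | cons item rest ih =>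
      rw [List.foldl_cons, innerA item ks hnd, List.map_map]
      have hmap : (ks.map
            ((fun p => if p.1 ∈ ks then (p.1, p.2 ++ [pvGet item p.1]) else p) ∘
              fun k => (k, g k)))
          = ks.map (fun k => (k, g k ++ [pvGet item k])) := by
        apply List.map_congr_left
        intro k hkm
        simp [hkm]
      rw [hmap, ih (fun k => g k ++ [pvGet item k])]
      simp

-- B's key-creation loop: appends the fresh keys, back-filled columns are correct cells
theorem innerB (pairs : List (String × String)) (ks : List String)
    (g : String → List String) (n : Nat)
    (hfill : ∀ k, k ∉ ks → g k = List.replicate n "") :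
    pairs.foldl (fun r kv =>
        if r.any (fun p => p.1 == kv.1) then r
        else r ++ [(kv.1, List.replicate n "")]) (ks.map (fun k => (k, g k)))
      = (PySem.Set.update ks (pairs.map Prod.fst)).map (fun k => (k, g k)) := by
  induction pairs generalizing ks with
  | nil => simp [PySem.Set.update]
  | cons kv rest ih =>
      rw [List.foldl_cons, List.map_cons, PySem.Set.update_cons]
      by_cases hmem : kv.1 ∈ ks
      · have hany : (ks.map (fun k => (k, g k))).any (fun p => p.1 == kv.1) = true := by
          simp only [List.any_map, List.any_eq_true]
          exact ⟨kv.1, hmem, by simp⟩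
        rw [hany, if_pos rfl, PySem.Set.add_of_mem hmem, ih ks hfill]
      · have hany : (ks.map (fun k => (k, g k))).any (fun p => p.1 == kv.1) = false := by
          simp only [List.any_map, List.any_eq_false]
          intro k hk
          simp only [Function.comp, beq_iff_eq]
          intro he; exact hmem (he ▸ hk)
        rw [hany, if_neg (by simp), PySem.Set.add_of_not_mem hmem]
        have : ks.map (fun k => (k, g k)) ++ [(kv.1, List.replicate n "")]
            = (ks ++ [kv.1]).map (fun k => (k, g k)) := by
          simp [hfill kv.1 hmem]
        rw [this, ih (ks ++ [kv.1])]
        intro k hk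
        exact hfill k (fun h => hk (List.mem_append_left _ h))

theorem backfill (pre : List (List (String × String))) (k : String)
    (h : k ∉ pre.flatMap (fun it => it.map Prod.fst)) :
    pre.map (fun it => pvGet it k) = List.replicate pre.length "" := by
  rw [← List.map_const]
  apply List.map_congr_left
  intro it hit
  exact pvGet_of_not_mem it k (fun hm => h (List.mem_flatMap.mpr ⟨it, hit, hm⟩))

-- B's outer loop invariant, stated over a processed prefix
theorem outerB (rest pre : List (List (String × String))) :
    (rest.foldl (fun (st : List (String × List String) × Nat) item =>
        let res := item.foldl (fun r (kv : String × String) =>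
            if r.any (fun p => p.1 == kv.1) then r
            else r ++ [(kv.1, List.replicate st.2 "")]) st.1
        (res.map (fun p => (p.1, p.2 ++ [pvGet item p.1])), st.2 + 1))
      ((PySem.List.dedup (pre.flatMap (fun it => it.map Prod.fst))).map
          (fun k => (k, pre.map (fun it => pvGet it k))), pre.length))
    = ((PySem.List.dedup ((pre ++ rest).flatMap (fun it => it.map Prod.fst))).map
          (fun k => (k, (pre ++ rest).map (fun it => pvGet it k))), (pre ++ rest).length) := by
  induction rest generalizing pre with
  | nil => simp
  | cons item tail ih =>
      rw [List.foldl_cons]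
      have hfill : ∀ k, k ∉ PySem.List.dedup (pre.flatMap (fun it => it.map Prod.fst)) →
          pre.map (fun it => pvGet it k) = List.replicate pre.length "" := by
        intro k hk
        exact backfill pre k (fun h => hk (by simpa [PySem.List.mem_dedup] using h))
      simp only
      rw [innerB item _ _ pre.length hfill, List.map_map]
      have hkeys : PySem.Set.update (PySem.List.dedup (pre.flatMap (fun it => it.map Prod.fst)))
            (item.map Prod.fst)
          = PySem.List.dedup ((pre ++ [item]).flatMap (fun it => it.map Prod.fst)) := by
        simp [PySem.List.dedup_eq_ofList, PySem.Set.ofList_append]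
      rw [hkeys]
      have hmap : ((PySem.List.dedup ((pre ++ [item]).flatMap fun it => it.map Prod.fst)).map
            ((fun p => (p.1, p.2 ++ [pvGet item p.1])) ∘ fun k => (k, pre.map fun it => pvGet it k)))
          = (PySem.List.dedup ((pre ++ [item]).flatMap fun it => it.map Prod.fst)).map
            (fun k => (k, (pre ++ [item]).map fun it => pvGet it k)) := by
        apply List.map_congr_left
        intro k _
        simp
      rw [hmap]
      have := ih (pre ++ [item])
      simpa [List.append_assoc] using this

theorem alt_eq_cols (data : List (List (String × String))) :
    process_json_array_py_alt data = pvCols data := by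
  unfold process_json_array_py_alt pvCols
  have := outerB data []
  simp only [List.nil_append, List.length_nil] at this
  rw [show (([] : List (String × List String)), 0)
      = ((PySem.List.dedup (([] : List (List (String × String))).flatMap (fun it => it.map Prod.fst))).map
          (fun k => (k, ([] : List (List (String × String))).map (fun it => pvGet it k))), 0) by simp]
  simp only [List.flatMap_nil, List.map_nil] at this ⊢
  rw [this]

theorem a_eq_cols (data : List (List (String × String))) :
    process_json_array_py data = pvCols data := by
  unfold process_json_array_py pvCols
  by_cases hd : data = []
  · subst hd; simp
  · rw [if_neg hd]
    simp only
    rw [keys_foldl_update]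
    have hkeys : PySem.Set.update PySem.Set.empty (data.flatMap (fun it => it.map Prod.fst))
        = PySem.List.dedup (data.flatMap (fun it => it.map Prod.fst)) := by
      simp [PySem.Set.empty, PySem.Set.update_nil_left, PySem.List.dedup_eq_ofList]
    rw [hkeys]
    exact outerA _ (PySem.List.nodup_dedup _) data (fun _ => [])

-- ===== VERDICT (by name: the statement is the Claim_ definition above) =====
theorem process_json_array_py_spec : Claim_equal_process_json_array_py := by
  intro data _
  unfold Spec_process_json_array_py
  rw [a_eq_cols, alt_eq_cols]
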